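-- pv_equiv track=rewrite | github.com/Nick648/Math_Arrays_etc_Python | Matrices_sem_1/matrices.py | mat32
-- ===== SOURCE A (Python) =====
-- def mat2(a):
-- 	S=a[0][0]*a[1][1]-a[0][1]*a[1][0]
-- 	return S
--
-- def mat32(a,j):
-- 	c=[[]*2]*2
-- 	for i in range(1,3):
-- 		b=[]
-- 		for g in range(3):
-- 			if g!=j:
-- 				b.append(a[i][g])
-- 		c[i-1]=b
-- 	return mat2(c)
-- ===== SOURCE B (Python) =====
-- def mat32(a, j):
--     # The minor deleting column j from rows 1,2 is a component of the cross
--     # product of those rows (up to sign): no submatrix is built, just a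
--     # three-way case table of closed-form 2x2 determinants.
--     r1, r2 = a[1], a[2]
--     if j == 0:
--         return r1[1] * r2[2] - r1[2] * r2[1]
--     if j == 1:
--         return r1[0] * r2[2] - r1[2] * r2[0]
--     return r1[0] * r2[1] - r1[1] * r2[0]
-- ===== Notes on version B (the rewrite author's own statement) =====
-- stated objective: simpler
-- what changed: Drops the nested loops, the intermediate 2x2 submatrix and the mat2 helper entirely: B is a three-way case table returning the closed-form 2x2 determinant (a cross-product component of rows 1 and 2) for each deleted column, with the j=2 formula doubling as the natural default for any other j (matching A, which then removes no column but only ever reads columns 0 and 1).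
import Mathlib
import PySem

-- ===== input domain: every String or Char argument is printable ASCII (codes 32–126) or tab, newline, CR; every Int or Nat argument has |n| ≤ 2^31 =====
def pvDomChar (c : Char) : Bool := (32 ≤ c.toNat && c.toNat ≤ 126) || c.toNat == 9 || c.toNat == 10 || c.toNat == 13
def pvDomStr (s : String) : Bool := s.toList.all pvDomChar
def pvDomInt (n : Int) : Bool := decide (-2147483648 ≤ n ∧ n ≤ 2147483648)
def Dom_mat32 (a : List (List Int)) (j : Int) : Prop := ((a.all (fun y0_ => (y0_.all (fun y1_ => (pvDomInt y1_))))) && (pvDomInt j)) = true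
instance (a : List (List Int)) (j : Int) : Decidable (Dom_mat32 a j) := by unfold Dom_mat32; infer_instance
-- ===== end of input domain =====

-- B replaces A's nested loops, intermediate 2x2 submatrix and mat2 helper by a three-way case
-- table of closed-form 2x2 determinants (cross-product components of rows 1,2); objective: simpler.


-- ===== PORT A =====
-- mat2(a): S = a[0][0]*a[1][1] - a[0][1]*a[1][0]
def pvMat2 (c : List (List Int)) : Int :=
  PySem.List.pyGetD (PySem.List.pyGetD c 0 []) 0 0 * PySem.List.pyGetD (PySem.List.pyGetD c 1 []) 1 0
    - PySem.List.pyGetD (PySem.List.pyGetD c 0 []) 1 0 * PySem.List.pyGetD (PySem.List.pyGetD c 1 []) 0 0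

-- c = [[]*2]*2; for i in range(1,3): b = []; for g in range(3): if g != j: b.append(a[i][g]); c[i-1] = b; return mat2(c)
def mat32 (a : List (List Int)) (j : Int) : Int :=
  let c0 : List (List Int) := [[], []]
  let c := (PySem.List.pyRange 1 3 1).foldl (fun c i =>
      let b := (PySem.List.pyRange 0 3 1).foldl (fun b g =>
          if g ≠ j then b ++ [PySem.List.pyGetD (PySem.List.pyGetD a i []) g 0] else b) []
      PySem.List.pySetD c (i - 1) b) c0
  pvMat2 c

-- ===== PORT B =====
-- r1, r2 = a[1], a[2]
-- if j == 0: return r1[1]*r2[2] - r1[2]*r2[1]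
-- if j == 1: return r1[0]*r2[2] - r1[2]*r2[0]
-- return r1[0]*r2[1] - r1[1]*r2[0]
-- (pyGetD is exact here: Pre_ guarantees every accessed index is in range)
def mat32_alt (a : List (List Int)) (j : Int) : Int :=
  let r1 := PySem.List.pyGetD a 1 []
  let r2 := PySem.List.pyGetD a 2 []
  if j = 0 then
    PySem.List.pyGetD r1 1 0 * PySem.List.pyGetD r2 2 0 - PySem.List.pyGetD r1 2 0 * PySem.List.pyGetD r2 1 0
  else if j = 1 then
    PySem.List.pyGetD r1 0 0 * PySem.List.pyGetD r2 2 0 - PySem.List.pyGetD r1 2 0 * PySem.List.pyGetD r2 0 0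
  else
    PySem.List.pyGetD r1 0 0 * PySem.List.pyGetD r2 1 0 - PySem.List.pyGetD r1 1 0 * PySem.List.pyGetD r2 0 0

-- ===== PRECONDITION & SPEC =====
-- Exactly where the Python A returns (no IndexError): at least 3 rows, and rows 1 and 2 contain
-- every column index in {0,1,2} other than j (an out-of-range j removes no column).
def Pre_mat32 (a : List (List Int)) (j : Int) : Prop :=
  3 ≤ a.length ∧
  ∀ g : Int, g ∈ ([0, 1, 2] : List Int) → g ≠ j →
    g < ((a.getD 1 []).length : Int) ∧ g < ((a.getD 2 []).length : Int)
instance (a : List (List Int)) (j : Int) : Decidable (Pre_mat32 a j) := by unfold Pre_mat32; infer_instance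
def pvWitness_mat32 : List (List Int) × Int := ([[9, 9, 9], [1, 2, 3], [4, 5, 6]], 0)

def Spec_mat32 (a : List (List Int)) (j : Int) (out : Int) : Prop := out = mat32_alt a j
instance (a : List (List Int)) (j : Int) (out : Int) : Decidable (Spec_mat32 a j out) := by unfold Spec_mat32; infer_instance

-- ===== CLAIM (what is proved, stated in full; the proofs are below) =====
def Claim_equal_mat32 : Prop := ∀ (a : List (List Int)) (j : Int), Dom_mat32 a j → Pre_mat32 a j → Spec_mat32 a j (mat32 a j)

-- ===== LEMMAS AND PROOFS =====

theorem pvGet1 {α : Type} (x y : α) (xs : List α) (d : α) :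
    PySem.List.pyGetD (x :: y :: xs) 1 d = y := by
  simp [PySem.List.pyGetD, PySem.List.pyGet?, PySem.List.pyIdx?]

theorem pvGet2 {α : Type} (x y z : α) (xs : List α) (d : α) :
    PySem.List.pyGetD (x :: y :: z :: xs) 2 d = z := by
  have h : (2 : Int) ≤ ↑xs.length + 1 + 1 := by omega
  simp [PySem.List.pyGetD, PySem.List.pyGet?, PySem.List.pyIdx?, h]

theorem pvSet0 (b y : List Int) : PySem.List.pySetD [[], y] 0 b = [b, y] := by
  simp [PySem.List.pySetD, PySem.List.pySet?, PySem.List.pyIdx?]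

theorem pvSet1 (b x y : List Int) : PySem.List.pySetD [x, y] 1 b = [x, b] := by
  simp [PySem.List.pySetD, PySem.List.pySet?, PySem.List.pyIdx?]

-- ===== VERDICT (by name: the statement is the Claim_ definition above) =====
theorem mat32_spec : Claim_equal_mat32 := by
  intro a j _ hpre
  obtain ⟨hlen, hcols⟩ := hpre
  rcases a with _ | ⟨a0, _ | ⟨a1, _ | ⟨a2, rest⟩⟩⟩ <;> try simp at hlen
  simp only [List.getD, List.getElem?_cons_succ, List.getElem?_cons_zero, Option.getD_some] at hcols
  have h1 : PySem.List.pyGetD (a0 :: a1 :: a2 :: rest) 1 [] = a1 := pvGet1 ..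
  have h2 : PySem.List.pyGetD (a0 :: a1 :: a2 :: rest) 2 [] = a2 := pvGet2 ..
  show Spec_mat32 _ _ _
  by_cases hj0 : j = 0
  · obtain ⟨h12, h22⟩ := hcols 2 (by simp) (by simp [hj0])
    rcases a1 with _ | ⟨x0, _ | ⟨x1, _ | ⟨x2, t1⟩⟩⟩ <;> norm_num at h12
    rcases a2 with _ | ⟨y0, _ | ⟨y1, _ | ⟨y2, t2⟩⟩⟩ <;> norm_num at h22
    subst hj0
    simp only [Spec_mat32, mat32, mat32_alt, pvMat2,
      (by decide : PySem.List.pyRange 1 3 1 = [1, 2]),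
      (by decide : PySem.List.pyRange 0 3 1 = [0, 1, 2]), List.foldl]
    norm_num
    rw [h1, h2, pvSet0, pvSet1]
    simp only [PySem.List.pyGetD_zero_cons, pvGet1, pvGet2]
  · by_cases hj1 : j = 1
    · obtain ⟨h12, h22⟩ := hcols 2 (by simp) (by simp [hj1])
      rcases a1 with _ | ⟨x0, _ | ⟨x1, _ | ⟨x2, t1⟩⟩⟩ <;> norm_num at h12
      rcases a2 with _ | ⟨y0, _ | ⟨y1, _ | ⟨y2, t2⟩⟩⟩ <;> norm_num at h22
      subst hj1
      simp only [Spec_mat32, mat32, mat32_alt, pvMat2,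
        (by decide : PySem.List.pyRange 1 3 1 = [1, 2]),
        (by decide : PySem.List.pyRange 0 3 1 = [0, 1, 2]), List.foldl]
      norm_num
      rw [h1, h2, pvSet0, pvSet1]
      simp only [PySem.List.pyGetD_zero_cons, pvGet1, pvGet2]
    · by_cases hj2 : j = 2
      · obtain ⟨h11, h21⟩ := hcols 1 (by simp) (by simp [hj2])
        rcases a1 with _ | ⟨x0, _ | ⟨x1, t1⟩⟩ <;> norm_num at h11
        rcases a2 with _ | ⟨y0, _ | ⟨y1, t2⟩⟩ <;> norm_num at h21
        subst hj2
        simp only [Spec_mat32, mat32, mat32_alt, pvMat2,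
          (by decide : PySem.List.pyRange 1 3 1 = [1, 2]),
          (by decide : PySem.List.pyRange 0 3 1 = [0, 1, 2]), List.foldl]
        norm_num
        rw [h1, h2, pvSet0, pvSet1]
        simp only [PySem.List.pyGetD_zero_cons, pvGet1]
      · obtain ⟨h12, h22⟩ := hcols 2 (by simp) (Ne.symm hj2)
        rcases a1 with _ | ⟨x0, _ | ⟨x1, _ | ⟨x2, t1⟩⟩⟩ <;> norm_num at h12
        rcases a2 with _ | ⟨y0, _ | ⟨y1, _ | ⟨y2, t2⟩⟩⟩ <;> norm_num at h22
        simp only [Spec_mat32, mat32, mat32_alt, pvMat2,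
          (by decide : PySem.List.pyRange 1 3 1 = [1, 2]),
          (by decide : PySem.List.pyRange 0 3 1 = [0, 1, 2]), List.foldl]
        rw [if_pos (Ne.symm hj0), if_pos (Ne.symm hj1), if_pos (Ne.symm hj2),
            if_pos (Ne.symm hj0), if_pos (Ne.symm hj1), if_pos (Ne.symm hj2),
            if_neg hj0, if_neg hj1]
        norm_num
        rw [h1, h2, pvSet0, pvSet1]
        simp only [PySem.List.pyGetD_zero_cons, pvGet1]
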